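-- pv_equiv track=rewrite | github.com/melisekm/Advent-of-code | 2024/02/src.py | solve
-- ===== SOURCE A (Python) =====
-- def solve(LN):
--     prev = LN[0]
--     for curr in LN[1:]:
--         if not (3 >= abs(curr - prev) >= 1):
--             return False
--         prev = curr
--     # no diff more than 1-3 and sorted, then safe
--     x = sorted(LN)
--     return LN == x or LN == list(reversed(x))
-- ===== SOURCE B (Python) =====
-- def solve(LN):
--     diffs = [b - a for a, b in zip(LN, LN[1:])]
--     return all(1 <= d <= 3 for d in diffs) or all(-3 <= d <= -1 for d in diffs)
-- ===== Notes on version B (the rewrite author's own statement) =====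
-- stated objective: simpler
-- what changed: Replaced the sort-and-compare monotonicity test with a direct check over adjacent differences: safe iff every adjacent difference is an increase of one to three, or every one a decrease of one to three.
import Mathlib
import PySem

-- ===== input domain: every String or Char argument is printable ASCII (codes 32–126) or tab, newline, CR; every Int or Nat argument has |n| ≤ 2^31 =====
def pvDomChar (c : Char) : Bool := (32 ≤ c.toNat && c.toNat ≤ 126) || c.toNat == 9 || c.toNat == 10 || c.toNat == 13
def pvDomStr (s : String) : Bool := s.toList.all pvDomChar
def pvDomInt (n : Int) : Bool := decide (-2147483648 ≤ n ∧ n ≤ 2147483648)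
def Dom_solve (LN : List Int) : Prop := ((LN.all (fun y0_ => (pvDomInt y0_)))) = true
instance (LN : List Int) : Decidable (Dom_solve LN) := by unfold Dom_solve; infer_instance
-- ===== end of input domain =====

-- B replaces A's sort-and-compare monotonicity test by a direct check of adjacent
-- differences (all small increases, or all small decreases); the equivalence below is on nonempty lists.

-- ===== PORT A =====
-- the for-loop of A: early `return False` when a gap is out of range, `true` = loop finished
def solveLoop : Int → List Int → Bool
  | _, [] => true
  | prev, curr :: rest =>
    if ¬ (3 ≥ |curr - prev| ∧ |curr - prev| ≥ 1) then false
    else solveLoop curr rest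

def solve (LN : List Int) : Bool :=
  match PySem.List.pyGet? LN 0 with
  | none => false   -- Python raises IndexError here (LN[0] on []); excluded by Pre_solve
  | some prev =>
    if solveLoop prev (PySem.List.slice LN (some 1) none) then
      let x := PySem.List.sorted LN (fun v => v)
      (LN == x) || (LN == x.reverse)
    else false

-- ===== PORT B =====
def solve_alt (LN : List Int) : Bool :=
  let diffs := (LN.zip (LN.drop 1)).map (fun p => p.2 - p.1)
  diffs.all (fun d => decide (1 ≤ d) && decide (d ≤ 3))
    || diffs.all (fun d => decide (-3 ≤ d) && decide (d ≤ -1))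

-- ===== PRECONDITION & SPEC =====
-- Pre_ excludes only the empty list, on which A raises IndexError (LN[0]).
def Pre_solve (LN : List Int) : Prop := LN ≠ []
instance (LN : List Int) : Decidable (Pre_solve LN) := by unfold Pre_solve; infer_instance
def pvWitness_solve : List Int := ([1, 3, 4])

def Spec_solve (LN : List Int) (out : Bool) : Prop := out = solve_alt LN
instance (LN : List Int) (out : Bool) : Decidable (Spec_solve LN out) := by unfold Spec_solve; infer_instance

-- ===== CLAIM (what is proved, stated in full; the proofs are below) =====
def Claim_equal_solve : Prop := ∀ (LN : List Int), Dom_solve LN → Pre_solve LN → Spec_solve LN (solve LN)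

-- ===== LEMMAS AND PROOFS =====

-- A's loop over LN[1:] checks every adjacent pair of LN
theorem solveLoop_eq_all : ∀ (rest : List Int) (p : Int),
    solveLoop p rest
      = ((p :: rest).zip rest).all
          (fun q => decide (1 ≤ |q.2 - q.1|) && decide (|q.2 - q.1| ≤ 3)) := by
  intro rest
  induction rest with
  | nil => intro p; simp [solveLoop]
  | cons c t ih =>
    intro p
    simp only [solveLoop, List.zip_cons_cons, List.all_cons, ih c]
    by_cases h : 3 ≥ |c - p| ∧ |c - p| ≥ 1
    · simp [h]
    · simp only [if_pos h]
      rcases not_and_or.mp h with h1 | h1 <;> simp [h1]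

-- "all adjacent pairs satisfy R" as a chain
theorem all_zip_isChain (R : Int → Int → Bool) : ∀ (l : List Int),
    ((l.zip (l.drop 1)).all (fun q => R q.1 q.2) = true)
      ↔ List.IsChain (fun a b => R a b = true) l := by
  intro l
  induction l with
  | nil => simp
  | cons p rest ih =>
    cases rest with
    | nil => simp
    | cons c t =>
      simp only [List.drop_succ_cons, List.drop_zero] at ih
      simp only [List.drop_succ_cons, List.drop_zero, List.zip_cons_cons, List.all_cons,
        Bool.and_eq_true, List.isChain_cons_cons, ih]

theorem isChain_and {R S : Int → Int → Prop} : ∀ {l : List Int},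
    List.IsChain R l → List.IsChain S l → List.IsChain (fun a b => R a b ∧ S a b) l := by
  intro l
  induction l with
  | nil => intro _ _; exact List.isChain_nil
  | cons p rest ih =>
    cases rest with
    | nil => intro _ _; exact List.isChain_singleton p
    | cons c t =>
      intro hR hS
      rw [List.isChain_cons_cons] at hR hS ⊢
      exact ⟨⟨hR.1, hS.1⟩, ih hR.2 hS.2⟩

theorem sorted_self_iff (l : List Int) :
    (PySem.List.sorted l (fun v => v) = l) ↔ List.Pairwise (· ≤ ·) l := by
  constructor
  · intro h; have := PySem.List.sorted_pairwise l (fun v => v); rwa [h] at this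
  · intro h; exact PySem.List.sorted_eq_self_of_pairwise l (fun v => v) h

theorem sorted_rev_iff (l : List Int) :
    (l = (PySem.List.sorted l (fun v => v)).reverse)
      ↔ List.Pairwise (fun a b : Int => b ≤ a) l := by
  constructor
  · intro h
    have hp := PySem.List.sorted_pairwise l (fun v => v)
    rw [h, List.pairwise_reverse]
    exact hp
  · intro h
    have hrev : List.Pairwise (fun a b : Int => a ≤ b) l.reverse :=
      List.pairwise_reverse.mpr h
    have := PySem.List.sorted_id_eq_of_perm_of_pairwise l l.reverse (l.reverse_perm) hrev
    rw [this, List.reverse_reverse]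

theorem solve_eq_alt (LN : List Int) (hpre : LN ≠ []) : solve LN = solve_alt LN := by
  cases LN with
  | nil => exact absurd rfl hpre
  | cons p rest =>
    haveI trGE : Trans (fun a b : Int => b ≤ a) (fun a b : Int => b ≤ a) (fun a b : Int => b ≤ a) :=
      ⟨fun h1 h2 => le_trans h2 h1⟩
    have hget : PySem.List.pyGet? (p :: rest) 0 = some p := by
      simp [PySem.List.pyGet?, PySem.List.pyIdx?]
    have hslice : PySem.List.slice (p :: rest) (some 1) none = rest := by
      simp [PySem.List.slice_from]
    rw [Bool.eq_iff_iff]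
    simp only [solve, solve_alt, hget, hslice, List.drop_succ_cons, List.drop_zero,
      List.all_map, Function.comp_def]
    rw [solveLoop_eq_all]
    have habs := all_zip_isChain
      (fun a b => decide (1 ≤ |b - a|) && decide (|b - a| ≤ 3)) (p :: rest)
    have hinc := all_zip_isChain
      (fun a b => decide (1 ≤ b - a) && decide (b - a ≤ 3)) (p :: rest)
    have hdec := all_zip_isChain
      (fun a b => decide (-3 ≤ b - a) && decide (b - a ≤ -1)) (p :: rest)
    simp only [List.drop_succ_cons, List.drop_zero] at habs hinc hdec
    constructor
    · intro h
      by_cases hloop : ((p :: rest).zip rest).all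
          (fun q => decide (1 ≤ |q.2 - q.1|) && decide (|q.2 - q.1| ≤ 3)) = true
      · rw [if_pos hloop] at h
        have hchAbs := habs.mp hloop
        simp only [Bool.or_eq_true, beq_iff_eq] at h
        simp only [Bool.or_eq_true]
        rcases h with h | h
        · -- increasing
          left
          rw [hinc]
          have hle : List.Pairwise (· ≤ ·) (p :: rest) := (sorted_self_iff _).mp h.symm
          have hchLe : List.IsChain (fun a b : Int => a ≤ b) (p :: rest) :=
            List.isChain_iff_pairwise.mpr hle
          refine (isChain_and hchAbs hchLe).imp ?_
          intro a b hab
          simp only [Bool.and_eq_true, decide_eq_true_eq] at hab ⊢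
          rcases abs_cases (b - a) with ⟨he, _⟩ | ⟨he, _⟩ <;> omega
        · -- decreasing
          right
          rw [hdec]
          have hge : List.Pairwise (fun a b : Int => b ≤ a) (p :: rest) :=
            (sorted_rev_iff _).mp h
          have hchGe : List.IsChain (fun a b : Int => b ≤ a) (p :: rest) :=
            List.isChain_iff_pairwise.mpr hge
          refine (isChain_and hchAbs hchGe).imp ?_
          intro a b hab
          simp only [Bool.and_eq_true, decide_eq_true_eq] at hab ⊢
          rcases abs_cases (b - a) with ⟨he, _⟩ | ⟨he, _⟩ <;> omega
      · rw [if_neg hloop] at h; exact absurd h (by simp)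
    · intro h
      simp only [Bool.or_eq_true] at h
      rcases h with h | h
      · have hch := hinc.mp h
        have hloop : ((p :: rest).zip rest).all
            (fun q => decide (1 ≤ |q.2 - q.1|) && decide (|q.2 - q.1| ≤ 3)) = true := by
          rw [habs]
          refine hch.imp ?_
          intro a b hab
          simp only [Bool.and_eq_true, decide_eq_true_eq] at hab ⊢
          rcases abs_cases (b - a) with ⟨he, _⟩ | ⟨he, _⟩ <;> omega
        rw [if_pos hloop]
        have hle : List.Pairwise (· ≤ ·) (p :: rest) :=
          List.isChain_iff_pairwise.mp (hch.imp (by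
            intro a b hab
            simp only [Bool.and_eq_true, decide_eq_true_eq] at hab
            omega))
        have := (sorted_self_iff (p :: rest)).mpr hle
        simp [this]
      · have hch := hdec.mp h
        have hloop : ((p :: rest).zip rest).all
            (fun q => decide (1 ≤ |q.2 - q.1|) && decide (|q.2 - q.1| ≤ 3)) = true := by
          rw [habs]
          refine hch.imp ?_
          intro a b hab
          simp only [Bool.and_eq_true, decide_eq_true_eq] at hab ⊢
          rcases abs_cases (b - a) with ⟨he, _⟩ | ⟨he, _⟩ <;> omega
        rw [if_pos hloop]
        have hge : List.Pairwise (fun a b : Int => b ≤ a) (p :: rest) :=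
          List.isChain_iff_pairwise.mp (hch.imp (by
            intro a b hab
            simp only [Bool.and_eq_true, decide_eq_true_eq] at hab
            omega))
        have := (sorted_rev_iff (p :: rest)).mpr hge
        simp [← this]

-- ===== VERDICT (by name: the statement is the Claim_ definition above) =====
theorem solve_spec : Claim_equal_solve := by
  intro LN _ hpre
  exact solve_eq_alt LN hpre
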